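-- pv_equiv track=rewrite | github.com/rudyluis/PROGDAEM | Python/PythonModelosEjercicios/Data_3_10-11-2024_ListasArchivocMAtrices/ListasCompresion/recursividad5.py | numero_motzkin
-- ===== SOURCE A (Python) =====
-- def numero_motzkin(n):
--     if n<0:
--         return []
--     motzkin=[1]
--     if(n==0):
--         return motzkin
--     motzkin.append(1)
--     if(n==1):
--         return motzkin
--     for i in range(2,n):
--         nuevo_numero=((2*i+1)*motzkin[-1]+(3*i-3)*motzkin[-2])//(i+2)
--         motzkin.append(nuevo_numero)
--     return motzkin
-- ===== SOURCE B (Python) =====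
-- def numero_motzkin(n):
--     # Computes the Motzkin numbers through the central trinomial coefficients
--     # t_k (central coefficient of (1+x+x^2)^k): first build t_0..t_{n+1} by the
--     # trinomial recurrence k*t_k = (2k-1)*t_{k-1} + 3(k-1)*t_{k-2}, then convert
--     # with the identity M_k = (2*t_{k+1} + 3*t_k - t_{k+2}) // 2.
--     if n < 0:
--         return []
--     if n == 0:
--         return [1]
--     if n == 1:
--         return [1, 1]
--     t = [1, 1]
--     for k in range(2, n + 2):
--         t.append(((2 * k - 1) * t[k - 1] + 3 * (k - 1) * t[k - 2]) // k)
--     return [(2 * t[k + 1] + 3 * t[k] - t[k + 2]) // 2 for k in range(n)]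
-- ===== Notes on version B (the rewrite author's own statement) =====
-- stated objective: alternative
-- what changed: B computes a different auxiliary sequence - the central trinomial coefficients, via their own two-term recurrence - and converts them to Motzkin numbers in a second pass with the identity M_k = (2t_{k+1}+3t_k-t_{k+2})/2, instead of A's direct three-term Motzkin recurrence; the Lean proof derives both recurrences from the generating-function relations S^2 = 1-2X-3X^2, U*S = 1.
import Mathlib
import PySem

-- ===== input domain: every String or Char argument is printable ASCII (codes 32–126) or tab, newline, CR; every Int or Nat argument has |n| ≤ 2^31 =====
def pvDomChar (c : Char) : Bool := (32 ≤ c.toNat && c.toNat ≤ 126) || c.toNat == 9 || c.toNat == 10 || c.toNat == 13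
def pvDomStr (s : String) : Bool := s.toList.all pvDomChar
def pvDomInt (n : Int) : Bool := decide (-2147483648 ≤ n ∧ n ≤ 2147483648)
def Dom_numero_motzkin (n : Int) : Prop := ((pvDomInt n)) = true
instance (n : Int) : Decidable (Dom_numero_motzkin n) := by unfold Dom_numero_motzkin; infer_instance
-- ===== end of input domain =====

-- B computes the central trinomial coefficients t_k by their own two-term recurrence
-- and converts them with M_k = (2t_{k+1} + 3t_k - t_{k+2})/2, instead of A's direct
-- three-term Motzkin recurrence; same values, a genuinely different O(n) algorithm.

-- ===== PORT A =====
-- loop body of A: append ((2*i+1)*motzkin[-1] + (3*i-3)*motzkin[-2]) // (i+2)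
def pvStepA (m : List Int) (i : Int) : List Int :=
  m ++ [PySem.Int.floordiv
          ((2 * i + 1) * ((PySem.List.pyGet? m (-1)).getD 0)
            + (3 * i - 3) * ((PySem.List.pyGet? m (-2)).getD 0))
          (i + 2)]
  -- m always has length ≥ 2 here, so pyGet? never yields none; getD 0 is unreachable

def numero_motzkin (n : Int) : List Int :=
  if n < 0 then []
  else if n = 0 then [1]
  else if n = 1 then [1, 1]
  else (PySem.List.pyRange 2 n 1).foldl pvStepA [1, 1]

-- ===== PORT B =====
-- loop body of B: t.append(((2*k-1)*t[k-1] + 3*(k-1)*t[k-2]) // k)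
def pvStepT (t : List Int) (k : Int) : List Int :=
  t ++ [PySem.Int.floordiv
          ((2 * k - 1) * ((PySem.List.pyGet? t (k - 1)).getD 0)
            + 3 * (k - 1) * ((PySem.List.pyGet? t (k - 2)).getD 0)) k]
  -- k is always the current length ≥ 2 here, so pyGet? never yields none

-- element of B's final comprehension: (2*t[k+1] + 3*t[k] - t[k+2]) // 2
def pvMzOf (t : List Int) (k : Int) : Int :=
  PySem.Int.floordiv
    (2 * ((PySem.List.pyGet? t (k + 1)).getD 0)
      + 3 * ((PySem.List.pyGet? t k).getD 0)
      - ((PySem.List.pyGet? t (k + 2)).getD 0)) 2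
  -- k+2 < len t on every use, so pyGet? never yields none

def numero_motzkin_alt (n : Int) : List Int :=
  if n < 0 then []
  else if n = 0 then [1]
  else if n = 1 then [1, 1]
  else
    let t := (PySem.List.pyRange 2 (n + 2) 1).foldl pvStepT [1, 1]
    (PySem.List.pyRange 0 n 1).map (fun k => pvMzOf t k)

-- ===== PRECONDITION & SPEC =====
def Spec_numero_motzkin (n : Int) (out : List Int) : Prop := out = numero_motzkin_alt n
instance (n : Int) (out : List Int) : Decidable (Spec_numero_motzkin n out) := by unfold Spec_numero_motzkin; infer_instance

-- ===== CLAIM (what is proved, stated in full; the proofs are below) =====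
def Claim_equal_numero_motzkin : Prop := ∀ (n : Int), Dom_numero_motzkin n → Spec_numero_motzkin n (numero_motzkin n)

-- ===== LEMMAS AND PROOFS =====

-- The Motzkin numbers, defined by the convolution recurrence (B's recurrence).
def Mz : ℕ → ℤ
  | 0 => 1
  | 1 => 1
  | (k+2) => Mz (k+1) + ∑ j ∈ Finset.range (k+1), Mz (k - j) * Mz (k - (k - j))
decreasing_by all_goals omega

lemma Mz_rec (k : ℕ) : Mz (k+2) = Mz (k+1) + ∑ j ∈ Finset.range (k+1), Mz j * Mz (k - j) := by
  rw [Mz]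
  congr 1
  apply Finset.sum_congr rfl
  intro j hj
  have hjk : j ≤ k := by simpa using Nat.lt_succ_iff.mp (Finset.mem_range.mp hj)
  rw [Nat.sub_sub_self hjk, mul_comm]

lemma Mz_zero : Mz 0 = 1 := by rw [Mz]
lemma Mz_one : Mz 1 = 1 := by rw [Mz]
lemma Mz_two : Mz 2 = 2 := by
  rw [Mz_rec]
  simp [Mz_zero, Mz_one]

-- generating function F(X) = Σ Mz n · Xⁿ and its formal derivative
noncomputable def Fz : PowerSeries ℤ := PowerSeries.mk Mz
noncomputable def dFz : PowerSeries ℤ := PowerSeries.derivativeFun Fz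

lemma coeff_Fz (n : ℕ) : PowerSeries.coeff n Fz = Mz n := PowerSeries.coeff_mk _ _

lemma coeff_dFz (n : ℕ) : PowerSeries.coeff n dFz = Mz (n+1) * ((n : ℤ) + 1) := by
  unfold dFz
  rw [PowerSeries.coeff_derivativeFun, coeff_Fz]

-- the functional equation F = 1 + X·F + X²·F², coefficientwise B's recurrence
lemma Fz_quad : Fz = 1 + PowerSeries.X * Fz + PowerSeries.X ^ 2 * Fz ^ 2 := by
  ext n
  rcases n with _ | n
  · simp [coeff_Fz, Mz_zero]
  · rcases n with _ | m
    · simp [coeff_Fz, Mz_one, Mz_zero, PowerSeries.coeff_succ_X_mul, PowerSeries.coeff_X_pow_mul']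
    · have h2 : PowerSeries.coeff (m+2) (PowerSeries.X ^ 2 * Fz ^ 2)
          = PowerSeries.coeff m (Fz ^ 2) := PowerSeries.coeff_X_pow_mul (Fz ^ 2) 2 m
      have hsq : PowerSeries.coeff m (Fz ^ 2)
          = ∑ j ∈ Finset.range (m+1), Mz j * Mz (m - j) := by
        rw [pow_two, PowerSeries.coeff_mul,
            Finset.Nat.sum_antidiagonal_eq_sum_range_succ_mk]
        simp [coeff_Fz]
      have h1 : PowerSeries.coeff (m+2) (PowerSeries.X * Fz)
          = Mz (m+1) := by
        rw [PowerSeries.coeff_succ_X_mul, coeff_Fz]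
      simp only [map_add, h2, hsq, h1, coeff_Fz, PowerSeries.coeff_one]
      rw [Mz_rec]
      simp
  -- the three coefficient cases 0, 1, m+2 of the functional equation

-- derivative of X·F
lemma dXF : PowerSeries.derivativeFun (PowerSeries.X * Fz)
    = PowerSeries.X * dFz + Fz := by
  rw [PowerSeries.derivativeFun_mul]
  have hX : PowerSeries.derivativeFun (PowerSeries.X : PowerSeries ℤ) = 1 :=
    PowerSeries.derivative_X
  rw [hX]
  simp [smul_eq_mul, dFz]

-- derivative of the functional equation
lemma Fz_deriv : dFz = (PowerSeries.X * dFz + Fz)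
    + 2 * ((PowerSeries.X * Fz) * (PowerSeries.X * dFz + Fz)) := by
  have hsq : (PowerSeries.X ^ 2 * Fz ^ 2 : PowerSeries ℤ)
      = (PowerSeries.X * Fz) * (PowerSeries.X * Fz) := by ring
  have h : PowerSeries.derivativeFun Fz
      = PowerSeries.derivativeFun (1 + PowerSeries.X * Fz + PowerSeries.X ^ 2 * Fz ^ 2) := by
    conv_lhs => rw [Fz_quad]
  rw [PowerSeries.derivativeFun_add, PowerSeries.derivativeFun_add,
      PowerSeries.derivativeFun_one, hsq, dXF, PowerSeries.derivativeFun_mul, dXF] at h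
  have hdef : dFz = PowerSeries.derivativeFun Fz := rfl
  conv_lhs => rw [hdef, h]
  simp only [smul_eq_mul, zero_add]
  ring

-- the linear ODE (X - 2X² - 3X³)·F' = (3X² + 3X - 2)·F + 2, derived algebraically
lemma Fz_ode :
    PowerSeries.X * dFz
      - PowerSeries.C (2:ℤ) * (PowerSeries.X ^ 2 * dFz)
      - PowerSeries.C (3:ℤ) * (PowerSeries.X ^ 3 * dFz)
    = PowerSeries.C (3:ℤ) * (PowerSeries.X ^ 2 * Fz)
      + PowerSeries.C (3:ℤ) * (PowerSeries.X * Fz)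
      - PowerSeries.C (2:ℤ) * Fz + PowerSeries.C (2:ℤ) := by
  have hq := Fz_quad
  have hd := Fz_deriv
  have hC2 : (PowerSeries.C (2:ℤ)) = (2 : PowerSeries ℤ) := by
    simp
  have hC3 : (PowerSeries.C (3:ℤ)) = (3 : PowerSeries ℤ) := by
    simp
  rw [hC2, hC3]
  linear_combination (4*PowerSeries.X^2*Fz + 2 + 4*PowerSeries.X^3*dFz) * hq
    + (PowerSeries.X - PowerSeries.X^2 - 2*PowerSeries.X^3*Fz) * hd

-- coefficient k+3 of the ODE: the three-term recurrence with polynomial coefficients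
lemma keyShift (k : ℕ) :
    ((k:ℤ) + 5) * Mz (k+3) = (2*(k:ℤ) + 7) * Mz (k+2) + (3*(k:ℤ) + 6) * Mz (k+1) := by
  have h := congrArg (PowerSeries.coeff (k+3)) Fz_ode
  have e1 : PowerSeries.coeff (k+3) (PowerSeries.X * dFz)
      = PowerSeries.coeff (k+2) dFz := PowerSeries.coeff_succ_X_mul (k+2) dFz
  have e2 : PowerSeries.coeff (k+3) (PowerSeries.X ^ 2 * dFz)
      = PowerSeries.coeff (k+1) dFz := PowerSeries.coeff_X_pow_mul dFz 2 (k+1)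
  have e3 : PowerSeries.coeff (k+3) (PowerSeries.X ^ 3 * dFz)
      = PowerSeries.coeff k dFz := PowerSeries.coeff_X_pow_mul dFz 3 k
  have f2 : PowerSeries.coeff (k+3) (PowerSeries.X ^ 2 * Fz)
      = PowerSeries.coeff (k+1) Fz := PowerSeries.coeff_X_pow_mul Fz 2 (k+1)
  have f1 : PowerSeries.coeff (k+3) (PowerSeries.X * Fz)
      = PowerSeries.coeff (k+2) Fz := PowerSeries.coeff_succ_X_mul (k+2) Fz
  have fC : PowerSeries.coeff (k+3) (PowerSeries.C (2:ℤ)) = 0 := by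
    rw [PowerSeries.coeff_C]
    simp
  simp only [map_sub, map_add, PowerSeries.coeff_C_mul, e1, e2, e3, f2, f1, fC,
    coeff_dFz, coeff_Fz] at h
  push_cast at h
  linear_combination h

-- uniform form used by the ports: (m+4)·M(m+2) = (2m+5)·M(m+1) + (3m+3)·M(m)
lemma keyAll (m : ℕ) :
    ((m:ℤ) + 4) * Mz (m+2) = (2*(m:ℤ) + 5) * Mz (m+1) + (3*(m:ℤ) + 3) * Mz m := by
  rcases m with _ | m'
  · simp [Mz_two, Mz_one, Mz_zero]
  · rw [show m' + 1 + 2 = m' + 3 from rfl, show m' + 1 + 1 = m' + 2 from rfl]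
    have := keyShift m'
    push_cast
    push_cast at this
    linear_combination this

-- the list [Mz 0, …, Mz (k-1)]
def mzL (k : ℕ) : List Int := (List.range k).map (fun j => Mz j)

lemma mzL_succ (k : ℕ) : mzL (k+1) = mzL k ++ [Mz k] := by
  simp [mzL, List.range_succ]

lemma mzL_decomp (m : ℕ) : mzL (m+2) = mzL m ++ [Mz m, Mz (m+1)] := by
  rw [mzL_succ, mzL_succ, List.append_assoc]
  rfl

lemma mzL_two : mzL 2 = [1, 1] := by
  simp [mzL, List.range_succ, Mz_zero, Mz_one]

lemma pv_get_neg_one (t : List Int) (a b : Int) :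
    PySem.List.pyGet? (t ++ [a, b]) (-1) = some b := by
  rw [PySem.List.pyGet?_neg_one]
  simp

lemma pv_get_neg_two (t : List Int) (a b : Int) :
    PySem.List.pyGet? (t ++ [a, b]) (-2) = some a := by
  rw [PySem.List.pyGet?_neg_ofNat _ 2 (by omega) (by simp)]
  simp

-- one step of A produces the next Motzkin number (exact division by keyAll)
lemma stepA (m : ℕ) :
    pvStepA (mzL (m+2)) ((m:ℤ) + 2) = mzL (m+3) := by
  unfold pvStepA
  rw [mzL_decomp, pv_get_neg_one, pv_get_neg_two]
  have hnum : (2 * ((m:ℤ) + 2) + 1) * Mz (m+1) + (3 * ((m:ℤ) + 2) - 3) * Mz m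
      = (((m:ℤ) + 2) + 2) * Mz (m+2) := by
    have := keyAll m
    linear_combination -1 * this
  rw [Option.getD_some, Option.getD_some, hnum,
      PySem.Int.floordiv_eq_ediv_of_pos (by omega : (0:ℤ) < (m:ℤ) + 2 + 2),
      Int.mul_ediv_cancel_left _ (by omega : ((m:ℤ) + 2 + 2) ≠ 0)]
  rw [← mzL_decomp, ← mzL_succ]

-- A's loop: foldl over range(2, m+2) builds [Mz 0, …, Mz (m+1)]
lemma A_loop (m : ℕ) :
    (PySem.List.pyRange 2 ((m:ℤ) + 2) 1).foldl pvStepA [1, 1] = mzL (m+2) := by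
  induction m with
  | zero =>
    rw [PySem.List.pyRange_one_eq_nil (by omega)]
    simp [mzL_two]
  | succ m ih =>
    have hsplit : PySem.List.pyRange 2 (((m:ℕ)+1 : ℕ) + 2 : Int) 1
        = PySem.List.pyRange 2 ((m:ℤ) + 2) 1 ++ [(m:ℤ) + 2] := by
      have : (((m:ℕ)+1 : ℕ) + 2 : Int) = ((m:ℤ) + 2) + 1 := by push_cast; ring
      rw [this, PySem.List.pyRange_one_succ_right (by omega)]
    push_cast at hsplit ⊢
    rw [hsplit, List.foldl_append]
    simp only [List.foldl_cons, List.foldl_nil]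
    rw [ih, stepA]

-- ===== B-side: central trinomial coefficients =====

-- Tz n = central coefficient of (1+x+x²)^n, defined as the convolution inverse
-- coefficients of S := 1 - X - 2X²F (so that U·S = 1 holds by construction)
def Tz : ℕ → ℤ
  | 0 => 1
  | 1 => 1
  | (m+2) => Tz (m+1) + 2 * ∑ j ∈ Finset.range (m+1), Mz (m - j) * Tz (m - (m - j))
decreasing_by all_goals omega

lemma Tz_rec (m : ℕ) :
    Tz (m+2) = Tz (m+1) + 2 * ∑ j ∈ Finset.range (m+1), Tz j * Mz (m - j) := by
  rw [Tz]
  congr 2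
  apply Finset.sum_congr rfl
  intro j hj
  have hjm : j ≤ m := by simpa using Nat.lt_succ_iff.mp (Finset.mem_range.mp hj)
  rw [Nat.sub_sub_self hjm, mul_comm]

lemma Tz_zero : Tz 0 = 1 := by rw [Tz]
lemma Tz_one : Tz 1 = 1 := by rw [Tz]
lemma Tz_two : Tz 2 = 3 := by
  rw [Tz_rec]
  simp [Tz_zero, Tz_one, Mz_zero]

noncomputable def Uz : PowerSeries ℤ := PowerSeries.mk Tz
noncomputable def Sz : PowerSeries ℤ :=
  1 - PowerSeries.X - PowerSeries.C (2:ℤ) * (PowerSeries.X ^ 2 * Fz)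
noncomputable def dUz : PowerSeries ℤ := PowerSeries.derivativeFun Uz
noncomputable def dSz : PowerSeries ℤ := PowerSeries.derivativeFun Sz

lemma coeff_Uz (n : ℕ) : PowerSeries.coeff n Uz = Tz n := PowerSeries.coeff_mk _ _

lemma coeff_dUz (n : ℕ) : PowerSeries.coeff n dUz = Tz (n+1) * ((n : ℤ) + 1) := by
  unfold dUz
  rw [PowerSeries.coeff_derivativeFun, coeff_Uz]

lemma pvC2 : (PowerSeries.C (2:ℤ)) = (2 : PowerSeries ℤ) := by simp
lemma pvC3 : (PowerSeries.C (3:ℤ)) = (3 : PowerSeries ℤ) := by simp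

lemma coeff_Sz0 : PowerSeries.coeff 0 Sz = 1 := by
  unfold Sz
  rw [map_sub, map_sub, PowerSeries.coeff_one, PowerSeries.coeff_C_mul,
      PowerSeries.coeff_X_pow_mul', PowerSeries.coeff_X]
  norm_num

lemma coeff_Sz1 : PowerSeries.coeff 1 Sz = -1 := by
  unfold Sz
  rw [map_sub, map_sub, PowerSeries.coeff_one, PowerSeries.coeff_C_mul,
      PowerSeries.coeff_X_pow_mul', PowerSeries.coeff_X]
  norm_num

lemma coeff_Sz2 (j : ℕ) : PowerSeries.coeff (j+2) Sz = -2 * Mz j := by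
  unfold Sz
  have h : PowerSeries.coeff (j+2) (PowerSeries.X ^ 2 * Fz)
      = PowerSeries.coeff j Fz := PowerSeries.coeff_X_pow_mul Fz 2 j
  have c0 : ¬ (j + 2 = 0) := by omega
  have c1 : ¬ (j + 2 = 1) := by omega
  rw [map_sub, map_sub, PowerSeries.coeff_one, PowerSeries.coeff_C_mul, h, coeff_Fz,
      PowerSeries.coeff_X, if_neg c0, if_neg c1]
  ring

-- U·S = 1: coefficientwise, exactly Tz's defining recurrence
lemma hU : Uz * Sz = 1 := by
  ext n
  rw [PowerSeries.coeff_mul, Finset.Nat.sum_antidiagonal_eq_sum_range_succ_mk]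
  rcases n with _ | n
  · simp [coeff_Uz, coeff_Sz0, Tz_zero]
  · rcases n with _ | m
    · simp [Finset.sum_range_succ, coeff_Uz, coeff_Sz0, coeff_Sz1, Tz_zero, Tz_one]
    · rw [Finset.sum_range_succ, Finset.sum_range_succ]
      have hterm : ∀ i ∈ Finset.range (m+1),
          (PowerSeries.coeff i Uz) * PowerSeries.coeff (m+2-i) Sz
            = -2 * (Tz i * Mz (m - i)) := by
        intro i hi
        have him : i < m + 1 := Finset.mem_range.mp hi
        have h1 : m + 2 - i = (m - i) + 2 := by omega
        rw [h1, coeff_Uz, coeff_Sz2]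
        ring
      rw [Finset.sum_congr rfl hterm]
      have h2 : m + 2 - (m+1) = 1 := by omega
      have h3 : m + 2 - (m+2) = 0 := by omega
      rw [h2, h3, coeff_Sz0, coeff_Sz1, coeff_Uz, coeff_Uz, ← Finset.mul_sum]
      have := Tz_rec m
      simp only [PowerSeries.coeff_one]
      norm_num
      linarith [this]

-- S² = 1 - 2X - 3X², a polynomial consequence of the functional equation
lemma hS2 : Sz * Sz = 1 - (2 : PowerSeries ℤ) * PowerSeries.X
    - (3 : PowerSeries ℤ) * PowerSeries.X ^ 2 := by
  have hq := Fz_quad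
  unfold Sz
  rw [pvC2]
  linear_combination (-4 * PowerSeries.X ^ 2) * hq

lemma pvDX : PowerSeries.derivativeFun (PowerSeries.X : PowerSeries ℤ) = 1 :=
  PowerSeries.derivative_X

lemma pvDX2 : PowerSeries.derivativeFun ((PowerSeries.X : PowerSeries ℤ) ^ 2)
    = 2 * PowerSeries.X := by
  rw [pow_two, PowerSeries.derivativeFun_mul, pvDX]
  simp [smul_eq_mul]
  ring

lemma pvDsub (f g : PowerSeries ℤ) :
    PowerSeries.derivativeFun (f - g)
      = PowerSeries.derivativeFun f - PowerSeries.derivativeFun g := by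
  ext n
  rw [PowerSeries.coeff_derivativeFun, map_sub, map_sub, PowerSeries.coeff_derivativeFun,
      PowerSeries.coeff_derivativeFun]
  ring

lemma pvD2 : PowerSeries.derivativeFun ((2 : PowerSeries ℤ)) = 0 := by
  rw [← pvC2, PowerSeries.derivativeFun_C]

lemma pvD3 : PowerSeries.derivativeFun ((3 : PowerSeries ℤ)) = 0 := by
  rw [← pvC3, PowerSeries.derivativeFun_C]

lemma Dpoly : PowerSeries.derivativeFun ((1 : PowerSeries ℤ)
      - (2 : PowerSeries ℤ) * PowerSeries.X - (3 : PowerSeries ℤ) * PowerSeries.X ^ 2)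
    = - (2 : PowerSeries ℤ) - (6 : PowerSeries ℤ) * PowerSeries.X := by
  rw [pvDsub, pvDsub, PowerSeries.derivativeFun_one, PowerSeries.derivativeFun_mul,
      PowerSeries.derivativeFun_mul, pvD2, pvD3, pvDX, pvDX2]
  simp only [smul_eq_mul]
  ring

lemma pv_two_ne : (2 : PowerSeries ℤ) ≠ 0 := by
  intro h
  rw [← pvC2] at h
  have h0 := congrArg (PowerSeries.coeff 0) h
  rw [PowerSeries.coeff_C, map_zero] at h0
  norm_num at h0

-- S·S' = -1 - 3X (derivative of S² = 1 - 2X - 3X², cancelling the factor 2)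
lemma hSS' : Sz * dSz = -1 - (3 : PowerSeries ℤ) * PowerSeries.X := by
  have h := congrArg PowerSeries.derivativeFun hS2
  rw [PowerSeries.derivativeFun_mul, Dpoly] at h
  apply mul_left_cancel₀ pv_two_ne
  have h' : 2 * (Sz * dSz)
      = Sz • PowerSeries.derivativeFun Sz + Sz • PowerSeries.derivativeFun Sz := by
    simp only [smul_eq_mul]
    unfold dSz
    ring
  rw [h', h]
  ring

-- differentiating U·S = 1
lemma hUS' : Uz * dSz + Sz * dUz = 0 := by
  have h := congrArg PowerSeries.derivativeFun hU
  rw [PowerSeries.derivativeFun_mul, PowerSeries.derivativeFun_one] at h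
  simpa [smul_eq_mul, dUz, dSz] using h

-- the trinomial ODE (1 - 2X - 3X²)·U' = (1 + 3X)·U
lemma hUode : dUz - (2 : PowerSeries ℤ) * (PowerSeries.X * dUz)
      - (3 : PowerSeries ℤ) * (PowerSeries.X ^ 2 * dUz)
    = Uz + (3 : PowerSeries ℤ) * (PowerSeries.X * Uz) := by
  linear_combination Sz * hUS' - dUz * hS2 - Uz * hSS'

-- coefficient k+2 of the ODE: the trinomial recurrence
lemma trinShift (k : ℕ) :
    ((k:ℤ) + 3) * Tz (k+3) = (2*(k:ℤ) + 5) * Tz (k+2) + (3*(k:ℤ) + 6) * Tz (k+1) := by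
  have h := congrArg (PowerSeries.coeff (k+2)) hUode
  rw [← pvC2, ← pvC3] at h
  have e2 : PowerSeries.coeff (k+2) (PowerSeries.X * dUz)
      = PowerSeries.coeff (k+1) dUz := PowerSeries.coeff_succ_X_mul (k+1) dUz
  have e3 : PowerSeries.coeff (k+2) (PowerSeries.X ^ 2 * dUz)
      = PowerSeries.coeff k dUz := PowerSeries.coeff_X_pow_mul dUz 2 k
  have f1 : PowerSeries.coeff (k+2) (PowerSeries.X * Uz)
      = PowerSeries.coeff (k+1) Uz := PowerSeries.coeff_succ_X_mul (k+1) Uz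
  simp only [map_sub, map_add, PowerSeries.coeff_C_mul, e2, e3, f1,
    coeff_dUz, coeff_Uz] at h
  push_cast at h
  linear_combination h

-- uniform form used by the port: (m+2)·t_{m+2} = (2m+3)·t_{m+1} + (3m+3)·t_m
lemma trinAll (m : ℕ) :
    ((m:ℤ) + 2) * Tz (m+2) = (2*(m:ℤ) + 3) * Tz (m+1) + (3*(m:ℤ) + 3) * Tz m := by
  rcases m with _ | m'
  · simp [Tz_two, Tz_one, Tz_zero]
  · rw [show m' + 1 + 2 = m' + 3 from rfl, show m' + 1 + 1 = m' + 2 from rfl]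
    have := trinShift m'
    push_cast
    push_cast at this
    linear_combination this

-- S = (1 - 2X - 3X²)·U, distributed for coefficient extraction
lemma hbridge : Sz = Uz - (2 : PowerSeries ℤ) * (PowerSeries.X * Uz)
    - (3 : PowerSeries ℤ) * (PowerSeries.X ^ 2 * Uz) := by
  linear_combination (-Sz) * hU + Uz * hS2

-- the conversion identity: 2·M_n = 2t_{n+1} + 3t_n - t_{n+2}
lemma bridgeId (n : ℕ) : (-2 : ℤ) * Mz n = Tz (n+2) - 2 * Tz (n+1) - 3 * Tz n := by
  have h := congrArg (PowerSeries.coeff (n+2)) hbridge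
  rw [← pvC2, ← pvC3] at h
  have e1 : PowerSeries.coeff (n+2) (PowerSeries.X * Uz)
      = PowerSeries.coeff (n+1) Uz := PowerSeries.coeff_succ_X_mul (n+1) Uz
  have e2 : PowerSeries.coeff (n+2) (PowerSeries.X ^ 2 * Uz)
      = PowerSeries.coeff n Uz := PowerSeries.coeff_X_pow_mul Uz 2 n
  rw [coeff_Sz2, map_sub, map_sub, PowerSeries.coeff_C_mul, PowerSeries.coeff_C_mul,
    e1, e2, coeff_Uz, coeff_Uz, coeff_Uz] at h
  linarith [h]

-- the list [Tz 0, …, Tz (k-1)]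
def tzL (k : ℕ) : List Int := (List.range k).map (fun j => Tz j)

lemma tzL_succ (k : ℕ) : tzL (k+1) = tzL k ++ [Tz k] := by
  simp [tzL, List.range_succ]

lemma tzL_two : tzL 2 = [1, 1] := by
  simp [tzL, List.range_succ, Tz_zero, Tz_one]

lemma tzL_get (N j : ℕ) (hj : j < N) :
    PySem.List.pyGet? (tzL N) ((j : ℕ) : Int) = some (Tz j) := by
  rw [PySem.List.pyGet?_natCast]
  simp [tzL, hj]

-- one step of B's first loop produces the next trinomial coefficient
lemma stepT (m : ℕ) :
    pvStepT (tzL (m+2)) ((m:ℤ) + 2) = tzL (m+3) := by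
  unfold pvStepT
  have i1 : ((m:ℤ) + 2) - 1 = ((m + 1 : ℕ) : Int) := by push_cast; ring
  have i2 : ((m:ℤ) + 2) - 2 = ((m : ℕ) : Int) := by omega
  rw [i1, i2, tzL_get (m+2) (m+1) (by omega), tzL_get (m+2) m (by omega)]
  have i3 : ((m + 1 : ℕ) : Int) = (m : ℤ) + 1 := by push_cast; ring
  rw [i3]
  have hnum : (2 * ((m:ℤ) + 2) - 1) * Tz (m+1) + 3 * ((m:ℤ) + 1) * Tz m
      = ((m:ℤ) + 2) * Tz (m+2) := by
    have := trinAll m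
    linear_combination -1 * this
  rw [Option.getD_some, Option.getD_some, hnum,
      PySem.Int.floordiv_eq_ediv_of_pos (by omega : (0:ℤ) < (m:ℤ) + 2),
      Int.mul_ediv_cancel_left _ (by omega : ((m:ℤ) + 2) ≠ 0)]
  rw [← tzL_succ]

-- B's first loop: foldl over range(2, m+2) builds [Tz 0, …, Tz (m+1)]
lemma T_loop (m : ℕ) :
    (PySem.List.pyRange 2 ((m:ℤ) + 2) 1).foldl pvStepT [1, 1] = tzL (m+2) := by
  induction m with
  | zero =>
    rw [PySem.List.pyRange_one_eq_nil (by omega)]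
    simp [tzL_two]
  | succ m ih =>
    have hsplit : PySem.List.pyRange 2 (((m:ℕ)+1 : ℕ) + 2 : Int) 1
        = PySem.List.pyRange 2 ((m:ℤ) + 2) 1 ++ [(m:ℤ) + 2] := by
      have : (((m:ℕ)+1 : ℕ) + 2 : Int) = ((m:ℤ) + 2) + 1 := by push_cast; ring
      rw [this, PySem.List.pyRange_one_succ_right (by omega)]
    push_cast at hsplit ⊢
    rw [hsplit, List.foldl_append]
    simp only [List.foldl_cons, List.foldl_nil]
    rw [ih, stepT]

-- B's conversion element equals the k-th Motzkin number
lemma mzOf_eq (N k : ℕ) (hk : k + 2 < N) :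
    pvMzOf (tzL N) ((k : ℕ) : Int) = Mz k := by
  unfold pvMzOf
  have i1 : ((k:ℕ) : Int) + 1 = ((k + 1 : ℕ) : Int) := by push_cast; ring
  have i2 : ((k:ℕ) : Int) + 2 = ((k + 2 : ℕ) : Int) := by push_cast; ring
  rw [i1, i2, tzL_get N (k+1) (by omega), tzL_get N (k+2) (by omega),
      tzL_get N k (by omega)]
  have hnum : 2 * Tz (k+1) + 3 * Tz k - Tz (k+2) = 2 * Mz k := by
    have := bridgeId k
    linarith [this]
  rw [Option.getD_some, Option.getD_some, Option.getD_some, hnum,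
      PySem.Int.floordiv_eq_ediv_of_pos (by omega : (0:ℤ) < (2:ℤ)),
      Int.mul_ediv_cancel_left _ (by omega : (2:ℤ) ≠ 0)]

-- B's whole n ≥ 2 branch produces [Mz 0, …, Mz (n-1)]
lemma B_main (m : ℕ) :
    (PySem.List.pyRange 0 ((m:ℤ) + 2) 1).map
        (fun k => pvMzOf ((PySem.List.pyRange 2 (((m:ℤ) + 2) + 2) 1).foldl pvStepT [1, 1]) k)
      = mzL (m+2) := by
  have hT : (PySem.List.pyRange 2 (((m:ℤ) + 2) + 2) 1).foldl pvStepT [1, 1] = tzL (m+4) := by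
    have h4 : ((m:ℤ) + 2) + 2 = (((m + 2 : ℕ)) : Int) + 2 := by push_cast; ring
    rw [h4, T_loop (m+2)]
  rw [hT]
  have hr : ((m:ℤ) + 2) = ((m + 2 : ℕ) : Int) := by push_cast; ring
  rw [hr, PySem.List.pyRange_zero_natCast, List.map_map]
  unfold mzL
  apply List.map_congr_left
  intro k hk
  have hkm : k < m + 2 := List.mem_range.mp hk
  simp only [Function.comp_apply]
  exact mzOf_eq (m+4) k (by omega)

-- ===== VERDICT (by name: the statement is the Claim_ definition above) =====
theorem numero_motzkin_spec : Claim_equal_numero_motzkin := by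
  intro n _
  unfold Spec_numero_motzkin numero_motzkin numero_motzkin_alt
  by_cases h0 : n < 0
  · simp [h0]
  · by_cases h1 : n = 0
    · simp [h1]
    · by_cases h2 : n = 1
      · simp [h2]
      · simp only [h0, h1, h2, if_false]
        obtain ⟨m, hm⟩ : ∃ m : ℕ, n = (m:ℤ) + 2 :=
          ⟨(n - 2).toNat, by omega⟩
        subst hm
        rw [A_loop, B_main]
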